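-- pv_equiv track=rewrite | github.com/0xabhishek29/AOC | 2025/day03_part1.py | solve
-- ===== SOURCE A (Python) =====
-- import itertools
--
-- def solve(inputs):
--     joltage_ratings = inputs
--
--     res = 0
--
--     for joltage_rating in joltage_ratings:
--         mxs = list(itertools.accumulate(joltage_rating[ : : -1], max))[ : : -1]
--         t = 0
--
--         for i in range(len(joltage_rating) - 1):
--             t = max(t, joltage_rating[i] * 10 + mxs[i + 1])
--
--         res += t
--
--     return res
-- ===== SOURCE B (Python) =====
-- def solve(inputs):
--     res = 0
--     for rating in inputs:
--         t = 0
--         if rating: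
--             best = rating[0]
--             for y in rating[1:]:
--                 t = max(t, best * 10 + y)
--                 best = max(best, y)
--         res += t
--     return res
-- ===== Notes on version B (the rewrite author's own statement) =====
-- stated objective: simpler
-- what changed: replaces the reversed accumulate suffix-max array plus a second indexed loop with a single left-to-right pass per list that maintains a running prefix maximum and folds candidates directly
import Mathlib
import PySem

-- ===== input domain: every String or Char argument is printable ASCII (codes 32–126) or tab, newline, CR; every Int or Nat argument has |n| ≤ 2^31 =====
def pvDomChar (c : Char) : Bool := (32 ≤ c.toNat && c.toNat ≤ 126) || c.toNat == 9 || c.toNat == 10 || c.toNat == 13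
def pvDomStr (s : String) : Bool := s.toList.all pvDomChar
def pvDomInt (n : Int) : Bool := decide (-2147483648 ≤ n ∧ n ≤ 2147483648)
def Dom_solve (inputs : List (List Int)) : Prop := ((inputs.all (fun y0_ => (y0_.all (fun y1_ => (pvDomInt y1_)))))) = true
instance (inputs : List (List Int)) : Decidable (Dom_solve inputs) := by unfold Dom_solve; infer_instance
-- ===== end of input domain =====

-- B replaces A's reversed suffix-max accumulate array and second indexed loop with one
-- left-to-right pass per list maintaining a running prefix maximum (objective: simpler).

-- ===== PORT A =====
-- itertools.accumulate(xs, max): running maxima, same length as xs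
def accMaxGo (cur : Int) : List Int → List Int
  | [] => [cur]
  | y :: rest => cur :: accMaxGo (max cur y) rest

def accMax : List Int → List Int
  | [] => []
  | x :: rest => accMaxGo x rest

-- pyGetD with default 0 is exact here: both indices are always in range in A's loop
def solve (inputs : List (List Int)) : Int :=
  inputs.foldl (fun res r =>
    let mxs := (PySem.List.slice?
        (accMax ((PySem.List.slice? r none none (-1)).getD []))
        none none (-1)).getD []
    let t := (PySem.List.pyRange 0 (PySem.List.len r - 1) 1).foldl
        (fun t i => max t (PySem.List.pyGetD r i 0 * 10 + PySem.List.pyGetD mxs (i + 1) 0)) 0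
    res + t) 0

-- ===== PORT B =====
def solve_alt (inputs : List (List Int)) : Int :=
  inputs.foldl (fun res r =>
    match r with
    | [] => res + 0
    | x :: rest =>
        res + (rest.foldl (fun (bt : Int × Int) y => (max bt.1 y, max bt.2 (bt.1 * 10 + y))) (x, 0)).2) 0

-- ===== PRECONDITION & SPEC =====
def Spec_solve (inputs : List (List Int)) (out : Int) : Prop := out = solve_alt inputs
instance (inputs : List (List Int)) (out : Int) : Decidable (Spec_solve inputs out) := by unfold Spec_solve; infer_instance

-- ===== CLAIM (what is proved, stated in full; the proofs are below) =====
def Claim_equal_solve : Prop := ∀ (inputs : List (List Int)), Dom_solve inputs → Spec_solve inputs (solve inputs)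

-- ===== LEMMAS AND PROOFS =====

-- suffix maxima of a list (what A's mxs computes)
def suffMax : List Int → List Int
  | [] => []
  | x :: rest => rest.foldl max x :: suffMax rest

-- A's candidate list: r[i]*10 + mxs[i+1]
def cand (r : List Int) : List Int :=
  List.zipWith (fun a m => a * 10 + m) r (suffMax r).tail

-- max of running fold shifts out
theorem foldl_max_shift (l : List Int) : ∀ (a b : Int), l.foldl max (max a b) = max a (l.foldl max b) := by
  induction l with
  | nil => intro a b; rfl
  | cons x l ih =>
      intro a b
      show l.foldl max (max (max a b) x) = max a (l.foldl max (max b x))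
      rw [max_assoc, ih]

theorem foldl_max_reverse (l : List Int) : ∀ (c : Int), l.reverse.foldl max c = l.foldl max c := by
  induction l with
  | nil => intro c; rfl
  | cons x l ih =>
      intro c
      rw [List.reverse_cons, List.foldl_append, ih]
      show max (l.foldl max c) x = l.foldl max (max c x)
      rw [max_comm c x, foldl_max_shift, max_comm]

theorem accMaxGo_snoc (xs : List Int) : ∀ (c y : Int),
    accMaxGo c (xs ++ [y]) = accMaxGo c xs ++ [max (xs.foldl max c) y] := by
  induction xs with
  | nil => intro c y; rfl
  | cons a xs ih =>
      intro c y
      show c :: accMaxGo (max c a) (xs ++ [y]) = (c :: accMaxGo (max c a) xs) ++ [max _ y]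
      rw [ih]
      simp [List.foldl]

theorem length_suffMax (l : List Int) : (suffMax l).length = l.length := by
  induction l with
  | nil => rfl
  | cons x l ih => simp [suffMax, ih]

theorem accrev (l : List Int) : (accMax l.reverse).reverse = suffMax l := by
  induction l with
  | nil => rfl
  | cons x rest ih =>
      cases hrev : rest.reverse with
      | nil =>
          have : rest = [] := by simpa using congrArg List.reverse hrev
          subst this
          rfl
      | cons a t =>
          have hr : (x :: rest).reverse = (a :: t) ++ [x] := by
            simp [List.reverse_cons, hrev]
          have hrest : rest = t.reverse ++ [a] := by
            have := congrArg List.reverse hrev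
            simpa using this
          rw [hr]
          show (accMaxGo a (t ++ [x])).reverse = suffMax (x :: rest)
          rw [accMaxGo_snoc, List.reverse_append]
          simp only [List.reverse_cons, List.reverse_nil, List.nil_append, List.singleton_append]
          show max (t.foldl max a) x :: (accMaxGo a t).reverse = suffMax (x :: rest)
          have h1 : (accMaxGo a t).reverse = suffMax rest := by
            rw [← ih, hrev]; rfl
          have h2 : rest.foldl max x = max (t.foldl max a) x := by
            rw [hrest, List.foldl_append]
            show max (t.reverse.foldl max x) a = _
            rw [foldl_max_reverse, max_comm _ a, max_comm _ x,
                ← foldl_max_shift, ← foldl_max_shift, max_comm a x]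
          rw [h1]
          simp [suffMax, h2]

theorem length_cand (r : List Int) : (cand r).length = r.length - 1 := by
  simp [cand, length_suffMax]

-- max of an optional extra candidate
def omax (a : Int) : Option Int → Int
  | none => a
  | some b => max a b

def candA : List Int → Option Int
  | [] => none
  | [_] => none
  | x :: y :: rest => some (omax (x * 10 + rest.foldl max y) (candA (y :: rest)))

def candB (b : Int) : List Int → Option Int
  | [] => none
  | y :: ys => some (omax (b * 10 + y) (candB (max b y) ys))

theorem foldl_cand (r : List Int) : ∀ (t : Int), (cand r).foldl max t = omax t (candA r) := by
  induction r with
  | nil => intro t; rfl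
  | cons x rest ih =>
      intro t
      cases rest with
      | nil => rfl
      | cons y rest' =>
          show ((x * 10 + rest'.foldl max y) :: cand (y :: rest')).foldl max t = _
          rw [List.foldl_cons, ih]
          show omax (max t (x * 10 + rest'.foldl max y)) (candA (y :: rest'))
              = omax t (candA (x :: y :: rest'))
          cases h : candA (y :: rest') with
          | none => simp [candA, h, omax]
          | some k => simp [candA, h, omax, max_assoc]

theorem B_inner (ys : List Int) : ∀ (b t : Int),
    (ys.foldl (fun (bt : Int × Int) y => (max bt.1 y, max bt.2 (bt.1 * 10 + y))) (b, t)).2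
      = omax t (candB b ys) := by
  induction ys with
  | nil => intro b t; rfl
  | cons y ys ih =>
      intro b t
      rw [List.foldl_cons]
      show (ys.foldl _ (max b y, max t (b * 10 + y))).2 = _
      rw [ih]
      cases h : candB (max b y) ys with
      | none => simp [candB, h, omax]
      | some k => simp [candB, h, omax, max_assoc]

theorem candB_eq_candA (ys : List Int) : ∀ (b : Int), candB b ys = candA (b :: ys) := by
  induction ys with
  | nil => intro b; rfl
  | cons y ys ih =>
      intro b
      cases ys with
      | nil => rfl
      | cons z zs =>
          show some (omax (b * 10 + y) (candB (max b y) (z :: zs))) = candA (b :: y :: z :: zs)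
          rw [ih (max b y)]
          show some (omax (b * 10 + y) (candA (max b y :: z :: zs)))
              = some (omax (b * 10 + (z :: zs).foldl max y) (candA (y :: z :: zs)))
          have hfold : (z :: zs).foldl max y = max y (zs.foldl max z) := by
            show zs.foldl max (max y z) = _
            rw [foldl_max_shift]
          rw [hfold]
          cases h : candA (z :: zs) with
          | none =>
              simp only [candA, h, omax]
              congr 1
              simp only [max_def]
              split_ifs <;> omega
          | some k =>
              simp only [candA, h, omax]
              congr 1
              simp only [max_def]
              split_ifs <;> omega

theorem A_inner (r : List Int) :
    (PySem.List.pyRange 0 ((r.length : Int) - 1) 1).foldl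
      (fun t i => max t (PySem.List.pyGetD r i 0 * 10 + PySem.List.pyGetD (suffMax r) (i + 1) 0)) 0
    = (cand r).foldl max 0 := by
  cases r with
  | nil =>
      rw [PySem.List.pyRange_one_eq_nil (by norm_num)]
      rfl
  | cons x rest =>
      have hb : ((x :: rest).length : Int) - 1 = (((cand (x :: rest)).length : Int)) := by
        rw [length_cand]; simp
      rw [hb]
      rw [PySem.List.foldl_congr_mem (g := fun t i => max t (PySem.List.pyGetD (cand (x :: rest)) i 0))]
      · exact PySem.List.foldl_pyRange_zero_pyGetD' (cand (x :: rest)) 0 max 0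
      · intro acc i hi
        rw [PySem.List.mem_pyRange_one] at hi
        obtain ⟨h0, h1⟩ := hi
        have hcl : (cand (x :: rest)).length = rest.length := by
          rw [length_cand]; simp
        have hik : i.toNat < rest.length := by omega
        have hsl : (suffMax (x :: rest)).length = rest.length + 1 := by
          rw [length_suffMax]; rfl
        rw [PySem.List.pyGetD_eq_getElem _ _ h0 (by simp; omega),
            PySem.List.pyGetD_eq_getElem _ _ (by omega) (by simp [hsl]; omega),
            PySem.List.pyGetD_eq_getElem _ _ h0 (by simp [hcl]; omega)]
        have htn : (i + 1).toNat = i.toNat + 1 := by omega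
        congr 1
        simp only [cand, List.getElem_zipWith]
        congr 1
        simp only [List.getElem_tail, htn]

-- per-list equality of the two inner computations
theorem per_list (res : Int) (r : List Int) :
    (fun res r =>
      let mxs := (PySem.List.slice?
          (accMax ((PySem.List.slice? r none none (-1)).getD []))
          none none (-1)).getD []
      let t := (PySem.List.pyRange 0 (PySem.List.len r - 1) 1).foldl
          (fun t i => max t (PySem.List.pyGetD r i 0 * 10 + PySem.List.pyGetD mxs (i + 1) 0)) 0
      res + t) res r
    = (fun res (r : List Int) =>
        match r with
        | [] => res + 0
        | x :: rest =>
            res + (rest.foldl (fun (bt : Int × Int) y => (max bt.1 y, max bt.2 (bt.1 * 10 + y))) (x, 0)).2) res r := by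
  have hmxs : (PySem.List.slice?
      (accMax ((PySem.List.slice? r none none (-1)).getD []))
      none none (-1)).getD [] = suffMax r := by
    rw [PySem.List.slice?_none_none_neg_one, PySem.List.slice?_none_none_neg_one]
    simpa using accrev r
  simp only [hmxs, PySem.List.len_eq]
  rw [A_inner, foldl_cand]
  cases r with
  | nil => rfl
  | cons x rest =>
      show res + omax 0 (candA (x :: rest)) = res + _
      rw [B_inner, candB_eq_candA]

-- ===== VERDICT (by name: the statement is the Claim_ definition above) =====
theorem solve_spec : Claim_equal_solve := by
  intro inputs _
  unfold Spec_solve solve solve_alt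
  exact PySem.List.foldl_congr_mem inputs _ _ 0 (fun acc r _ => per_list acc r)
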